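-- pv_equiv track=rewrite | github.com/erikkjellgren/SlowQuant | slowquant/unitary_coupled_cluster/operator_extended.py | generate_doubles
-- ===== SOURCE A (Python) =====
-- from collections.abc import Generator, Sequence
--
-- def generate_doubles(
--     num_inactive_orbs: int, num_virtual_orbs: int
-- ) -> Generator[tuple[list[int], list[int]], None, None]:
--     """Generate double excited determinant in the inactive and virtual space.
--
--     These are generated via double excitation between all three spaces and thus are only particle conserving in the full space.
--     It includes double excitations: inactive -> virtual, inactive -> active (no change in virtual), active -> virtual (no change in occ)
--     The reference is also included.
--
--     Args:
--         num_inactive_orbs: Number of inactive spatial orbitals.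
--         num_virtual_orbs: Number of virtual spatial orbitals.
--
--     Returns:
--         Double excited determinants.
--     """
--     inactive = [1] * num_inactive_orbs
--     virtual = [0] * num_virtual_orbs
--     # loop over excitations out of all inactive orbs
--     # add loop index for not changing inactive orb
--     for i in range(num_inactive_orbs + 1):
--         if i != num_inactive_orbs:
--             inactive[i] = 0
--         # second orb for excitation out of
--         for i2 in range(min(i + 1, num_inactive_orbs), num_inactive_orbs + 1):
--             if i2 != num_inactive_orbs:
--                 inactive[i2] = 0
--             # loop over excitations into virtual orbs
--             # add loop index for not changing virtal orb
--             for j in range(num_virtual_orbs + 1):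
--                 if j != num_virtual_orbs:
--                     virtual[j] = 1
--                 # second orb for excitation into
--                 for j2 in range(min(j + 1, num_virtual_orbs), num_virtual_orbs + 1):
--                     if j2 != num_virtual_orbs:
--                         virtual[j2] = 1
--                     yield inactive.copy(), virtual.copy()
--                     if j2 != num_virtual_orbs:
--                         virtual[j2] = 0
--                 if j != num_virtual_orbs:
--                     virtual[j] = 0
--             if i2 != num_inactive_orbs:
--                 inactive[i2] = 1
--         if i != num_inactive_orbs:
--             inactive[i] = 1
-- ===== SOURCE B (Python) =====
-- from itertools import product
--
-- def generate_doubles(num_inactive_orbs, num_virtual_orbs):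
--     """Yield the same determinants by direct construction from enumerated index pairs."""
--     inact_pairs = [(i, i2) for i, i2 in product(range(num_inactive_orbs + 1), repeat=2)
--                    if i < i2 or i == i2 == num_inactive_orbs]
--     for i, i2 in inact_pairs:
--         occ = [0 if k in (i, i2) else 1 for k in range(num_inactive_orbs)]
--         virt_pairs = [(j, j2) for j, j2 in product(range(num_virtual_orbs + 1), repeat=2)
--                       if j < j2 or j == j2 == num_virtual_orbs]
--         for j, j2 in virt_pairs:
--             vir = [1 if k in (j, j2) else 0 for k in range(num_virtual_orbs)]
--             yield occ.copy(), vir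
-- ===== Notes on version B (the rewrite author's own statement) =====
-- stated objective: alternative
-- what changed: Replaces A's four nested mutate-and-restore loops over shared inactive/virtual lists by precomputing the index-pair lists (a filtered product of range indices: all i<i2 plus the (n,n) reference pair) and constructing each determinant list directly by comprehension, preserving the exact yield order.
import Mathlib
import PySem

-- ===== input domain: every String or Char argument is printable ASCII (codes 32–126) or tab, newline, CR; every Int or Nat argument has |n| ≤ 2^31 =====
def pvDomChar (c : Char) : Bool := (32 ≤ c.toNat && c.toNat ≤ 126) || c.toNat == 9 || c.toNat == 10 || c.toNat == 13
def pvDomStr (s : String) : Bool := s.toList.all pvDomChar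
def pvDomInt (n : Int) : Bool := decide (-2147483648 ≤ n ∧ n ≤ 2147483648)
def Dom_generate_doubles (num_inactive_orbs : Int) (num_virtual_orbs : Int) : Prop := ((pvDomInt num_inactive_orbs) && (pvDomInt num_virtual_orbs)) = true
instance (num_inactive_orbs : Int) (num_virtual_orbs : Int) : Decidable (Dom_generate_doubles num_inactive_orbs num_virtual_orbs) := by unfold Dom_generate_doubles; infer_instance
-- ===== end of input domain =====

-- B replaces A's mutate-and-restore nested loops by direct construction of each determinant
-- from precomputed index-pair lists (objective: simpler/alternative decomposition, same output order).

-- ===== PORT A =====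
-- state threaded through all four loops: (inactive, virtual, accumulated yields)
def gdBodyJ2 (m : Int) (st : List Int × List Int × List (List Int × List Int)) (j2 : Int) :
    List Int × List Int × List (List Int × List Int) :=
  let st1 := if j2 ≠ m then (st.1, st.2.1.set j2.toNat 1, st.2.2) else st
  let st2 := (st1.1, st1.2.1, st1.2.2 ++ [(st1.1, st1.2.1)])
  if j2 ≠ m then (st2.1, st2.2.1.set j2.toNat 0, st2.2.2) else st2

def gdLoopJ2 (m j : Int) (st : List Int × List Int × List (List Int × List Int)) :
    List Int × List Int × List (List Int × List Int) :=
  (PySem.List.pyRange (min (j + 1) m) (m + 1) 1).foldl (gdBodyJ2 m) st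

def gdBodyJ (m : Int) (st : List Int × List Int × List (List Int × List Int)) (j : Int) :
    List Int × List Int × List (List Int × List Int) :=
  let st1 := if j ≠ m then (st.1, st.2.1.set j.toNat 1, st.2.2) else st
  let st2 := gdLoopJ2 m j st1
  if j ≠ m then (st2.1, st2.2.1.set j.toNat 0, st2.2.2) else st2

def gdLoopJ (m : Int) (st : List Int × List Int × List (List Int × List Int)) :
    List Int × List Int × List (List Int × List Int) :=
  (PySem.List.pyRange 0 (m + 1) 1).foldl (gdBodyJ m) st

def gdBodyI2 (n m : Int) (st : List Int × List Int × List (List Int × List Int)) (i2 : Int) :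
    List Int × List Int × List (List Int × List Int) :=
  let st1 := if i2 ≠ n then (st.1.set i2.toNat 0, st.2.1, st.2.2) else st
  let st2 := gdLoopJ m st1
  if i2 ≠ n then (st2.1.set i2.toNat 1, st2.2.1, st2.2.2) else st2

def gdLoopI2 (n m i : Int) (st : List Int × List Int × List (List Int × List Int)) :
    List Int × List Int × List (List Int × List Int) :=
  (PySem.List.pyRange (min (i + 1) n) (n + 1) 1).foldl (gdBodyI2 n m) st

def gdBodyI (n m : Int) (st : List Int × List Int × List (List Int × List Int)) (i : Int) :
    List Int × List Int × List (List Int × List Int) :=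
  let st1 := if i ≠ n then (st.1.set i.toNat 0, st.2.1, st.2.2) else st
  let st2 := gdLoopI2 n m i st1
  if i ≠ n then (st2.1.set i.toNat 1, st2.2.1, st2.2.2) else st2

def generate_doubles (num_inactive_orbs : Int) (num_virtual_orbs : Int) : List (List Int × List Int) :=
  ((PySem.List.pyRange 0 (num_inactive_orbs + 1) 1).foldl (gdBodyI num_inactive_orbs num_virtual_orbs)
    (List.replicate num_inactive_orbs.toNat (1 : Int),
     List.replicate num_virtual_orbs.toNat (0 : Int),
     ([] : List (List Int × List Int)))).2.2

-- ===== PORT B =====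
-- [(i, i2) for i, i2 in product(range(n+1), repeat=2) if i < i2 or i == i2 == n]
def combPairs (n : Int) : List (Int × Int) :=
  (PySem.List.pyRange 0 (n + 1) 1).flatMap (fun i =>
    ((PySem.List.pyRange 0 (n + 1) 1).filter
      (fun i2 => decide (i < i2 ∨ (i = i2 ∧ i2 = n)))).map (fun i2 => (i, i2)))

-- [0 if k in (i, i2) else 1 for k in range(n)]
def occList (n i i2 : Int) : List Int :=
  (PySem.List.pyRange 0 n 1).map (fun k => if k = i ∨ k = i2 then (0 : Int) else 1)

-- [1 if k in (j, j2) else 0 for k in range(m)]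
def virList (m j j2 : Int) : List Int :=
  (PySem.List.pyRange 0 m 1).map (fun k => if k = j ∨ k = j2 then (1 : Int) else 0)

def generate_doubles_alt (num_inactive_orbs : Int) (num_virtual_orbs : Int) : List (List Int × List Int) :=
  (combPairs num_inactive_orbs).flatMap (fun p =>
    (combPairs num_virtual_orbs).map (fun q =>
      (occList num_inactive_orbs p.1 p.2, virList num_virtual_orbs q.1 q.2)))

-- ===== PRECONDITION & SPEC =====
def Spec_generate_doubles (num_inactive_orbs : Int) (num_virtual_orbs : Int) (out : List (List Int × List Int)) : Prop := out = generate_doubles_alt num_inactive_orbs num_virtual_orbs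
instance (num_inactive_orbs : Int) (num_virtual_orbs : Int) (out : List (List Int × List Int)) : Decidable (Spec_generate_doubles num_inactive_orbs num_virtual_orbs out) := by unfold Spec_generate_doubles; infer_instance

-- ===== CLAIM (what is proved, stated in full; the proofs are below) =====
def Claim_equal_generate_doubles : Prop := ∀ (num_inactive_orbs : Int) (num_virtual_orbs : Int), Dom_generate_doubles num_inactive_orbs num_virtual_orbs → Spec_generate_doubles num_inactive_orbs num_virtual_orbs (generate_doubles num_inactive_orbs num_virtual_orbs)

-- ===== LEMMAS AND PROOFS =====

-- setting index t (0 ≤ t < m) in a range-comprehension list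
theorem pv_set_map (f : Int → Int) (m t v : Int) (h0 : 0 ≤ t) (h1 : t < m) :
    ((PySem.List.pyRange 0 m 1).map f).set t.toNat v
      = (PySem.List.pyRange 0 m 1).map (fun k => if k = t then v else f k) := by
  apply List.ext_getElem
  · simp
  · intro k hk hk'
    simp only [List.getElem_set, List.getElem_map, PySem.List.getElem_pyRange_one]
    simp only [List.length_map, PySem.List.length_pyRange_one] at hk
    split_ifs with hA hB hB
    · rfl
    · omega
    · omega
    · rfl

theorem pv_map_range_congr (m : Int) (g1 g2 : Int → Int)
    (h : ∀ k, 0 ≤ k → k < m → g1 k = g2 k) :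
    (PySem.List.pyRange 0 m 1).map g1 = (PySem.List.pyRange 0 m 1).map g2 := by
  apply List.map_congr_left
  intro x hx
  have := (PySem.List.mem_pyRange_one).mp hx
  exact h x this.1 this.2

theorem repl_vir (m : Int) :
    List.replicate m.toNat (0 : Int) = virList m m m := by
  unfold virList
  apply List.ext_getElem
  · simp
  · intro k h1 h2
    simp only [List.getElem_map, PySem.List.getElem_pyRange_one, List.getElem_replicate]
    have hne : ¬((0 : Int) + k = m ∨ (0 : Int) + k = m) := by
      simp only [List.length_replicate] at h1; omega
    rw [if_neg hne]

theorem repl_occ (n : Int) :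
    List.replicate n.toNat (1 : Int) = occList n n n := by
  unfold occList
  apply List.ext_getElem
  · simp
  · intro k h1 h2
    simp only [List.getElem_map, PySem.List.getElem_pyRange_one, List.getElem_replicate]
    have hne : ¬((0 : Int) + k = n ∨ (0 : Int) + k = n) := by
      simp only [List.length_replicate] at h1; omega
    rw [if_neg hne]

theorem v1 (m j : Int) (h0 : 0 ≤ j) (h1 : j < m) :
    (virList m m m).set j.toNat 1 = virList m j m := by
  unfold virList
  rw [pv_set_map _ m j 1 h0 h1]
  exact pv_map_range_congr _ _ _ (by intro k hk1 hk2; split_ifs <;> omega)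

theorem v2 (m j x : Int) (h0 : 0 ≤ x) (h1 : x < m) (hx : x ≠ j) :
    (virList m j m).set x.toNat 1 = virList m j x := by
  unfold virList
  rw [pv_set_map _ m x 1 h0 h1]
  exact pv_map_range_congr _ _ _ (by intro k hk1 hk2; split_ifs <;> omega)

theorem v3 (m j x : Int) (h0 : 0 ≤ x) (h1 : x < m) (hx : x ≠ j) :
    (virList m j x).set x.toNat 0 = virList m j m := by
  unfold virList
  rw [pv_set_map _ m x 0 h0 h1]
  exact pv_map_range_congr _ _ _ (by intro k hk1 hk2; split_ifs <;> omega)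

theorem v4 (m j : Int) (h0 : 0 ≤ j) (h1 : j < m) :
    (virList m j m).set j.toNat 0 = virList m m m := by
  unfold virList
  rw [pv_set_map _ m j 0 h0 h1]
  exact pv_map_range_congr _ _ _ (by intro k hk1 hk2; split_ifs <;> omega)

theorem o1 (n i : Int) (h0 : 0 ≤ i) (h1 : i < n) :
    (occList n n n).set i.toNat 0 = occList n i n := by
  unfold occList
  rw [pv_set_map _ n i 0 h0 h1]
  exact pv_map_range_congr _ _ _ (by intro k hk1 hk2; split_ifs <;> omega)

theorem o2 (n i x : Int) (h0 : 0 ≤ x) (h1 : x < n) (hx : x ≠ i) :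
    (occList n i n).set x.toNat 0 = occList n i x := by
  unfold occList
  rw [pv_set_map _ n x 0 h0 h1]
  exact pv_map_range_congr _ _ _ (by intro k hk1 hk2; split_ifs <;> omega)

theorem o3 (n i x : Int) (h0 : 0 ≤ x) (h1 : x < n) (hx : x ≠ i) :
    (occList n i x).set x.toNat 1 = occList n i n := by
  unfold occList
  rw [pv_set_map _ n x 1 h0 h1]
  exact pv_map_range_congr _ _ _ (by intro k hk1 hk2; split_ifs <;> omega)

theorem o4 (n i : Int) (h0 : 0 ≤ i) (h1 : i < n) :
    (occList n i n).set i.toNat 1 = occList n n n := by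
  unfold occList
  rw [pv_set_map _ n i 1 h0 h1]
  exact pv_map_range_congr _ _ _ (by intro k hk1 hk2; split_ifs <;> omega)

-- the j2 loop, generic over remaining index list
theorem LJ2aux (m j : Int) (hj0 : 0 ≤ j) (hjm : j ≤ m) (inact : List Int) :
    ∀ (L : List Int), (∀ x ∈ L, min (j + 1) m ≤ x ∧ x ≤ m) →
    ∀ acc, L.foldl (gdBodyJ2 m) (inact, virList m j m, acc)
      = (inact, virList m j m, acc ++ L.map (fun j2 => (inact, virList m j j2))) := by
  intro L
  induction L with
  | nil => intro _ acc; simp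
  | cons x L ih =>
    intro hmem acc
    have hx := hmem x (List.mem_cons_self)
    have ih' := ih (fun y hy => hmem y (List.mem_cons_of_mem _ hy))
    by_cases hxm : x = m
    · simp only [List.foldl_cons]
      have hstep : gdBodyJ2 m (inact, virList m j m, acc) x
          = (inact, virList m j m, acc ++ [(inact, virList m j m)]) := by
        subst hxm; simp [gdBodyJ2]
      rw [hstep, ih']
      simp [hxm]
    · simp only [List.foldl_cons]
      have hx0 : 0 ≤ x := by omega
      have hxlt : x < m := by omega
      have hxj : x ≠ j := by omega
      have : gdBodyJ2 m (inact, virList m j m, acc) x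
          = (inact, virList m j m, acc ++ [(inact, virList m j x)]) := by
        simp only [gdBodyJ2, ne_eq, hxm, not_false_eq_true, if_pos]
        rw [v2 m j x hx0 hxlt hxj, v3 m j x hx0 hxlt hxj]
      rw [this, ih']
      simp

theorem LJ2 (m j : Int) (hj0 : 0 ≤ j) (hjm : j ≤ m) (inact : List Int) (acc : List (List Int × List Int)) :
    gdLoopJ2 m j (inact, virList m j m, acc)
      = (inact, virList m j m,
         acc ++ (PySem.List.pyRange (min (j + 1) m) (m + 1) 1).map (fun j2 => (inact, virList m j j2))) := by
  unfold gdLoopJ2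
  apply LJ2aux m j hj0 hjm inact _ _ acc
  intro x hx
  have := (PySem.List.mem_pyRange_one).mp hx
  omega

theorem pv_flatMap_congr {α β : Type} (l : List α) (f g : α → List β)
    (h : ∀ x ∈ l, f x = g x) : l.flatMap f = l.flatMap g := by
  induction l with
  | nil => rfl
  | cons x l ih =>
    simp only [List.flatMap_cons]
    rw [h x (List.mem_cons_self), ih (fun y hy => h y (List.mem_cons_of_mem _ hy))]

-- B's filtered product of indices, rewritten as strict pairs followed by the (n, n) pair
theorem combPairs_eq (n : Int) (hn : 0 ≤ n) :
    combPairs n = ((PySem.List.pyRange 0 n 1).flatMap (fun i =>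
      (PySem.List.pyRange (i + 1) (n + 1) 1).map (fun i2 => (i, i2)))) ++ [(n, n)] := by
  unfold combPairs
  have hbody : ∀ i ∈ PySem.List.pyRange 0 (n + 1) 1,
      ((PySem.List.pyRange 0 (n + 1) 1).filter
        (fun i2 => decide (i < i2 ∨ (i = i2 ∧ i2 = n)))).map (fun i2 => (i, i2))
      = (if i = n then [((n : Int), (n : Int))]
         else (PySem.List.pyRange (i + 1) (n + 1) 1).map (fun i2 => (i, i2))) := by
    intro i hi
    have hi' := (PySem.List.mem_pyRange_one).mp hi
    by_cases hin : i = n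
    · rw [if_pos hin, hin]
      have hdiag : ((PySem.List.pyRange 0 (n + 1) 1).filter
          (fun i2 => decide (n < i2 ∨ (n = i2 ∧ i2 = n)))) = [n] := by
        rw [PySem.List.pyRange_one_append 0 n (n + 1) hn (by omega), List.filter_append]
        have h1 : ((PySem.List.pyRange 0 n 1).filter
            (fun i2 => decide (n < i2 ∨ (n = i2 ∧ i2 = n)))) = [] := by
          apply List.filter_eq_nil_iff.mpr
          intro x hx
          have := (PySem.List.mem_pyRange_one).mp hx
          simp only [decide_eq_true_eq]
          omega
        rw [h1, List.nil_append, PySem.List.pyRange_one_cons (by omega),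
          PySem.List.pyRange_one_eq_nil (by omega : n + 1 ≤ n + 1)]
        simp
      rw [hdiag]
      simp
    · rw [if_neg hin]
      have hfilter : ((PySem.List.pyRange 0 (n + 1) 1).filter
          (fun i2 => decide (i < i2 ∨ (i = i2 ∧ i2 = n)))) = PySem.List.pyRange (i + 1) (n + 1) 1 := by
        rw [PySem.List.pyRange_one_append 0 (i + 1) (n + 1) (by omega) (by omega), List.filter_append]
        have h1 : ((PySem.List.pyRange 0 (i + 1) 1).filter
            (fun i2 => decide (i < i2 ∨ (i = i2 ∧ i2 = n)))) = [] := by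
          apply List.filter_eq_nil_iff.mpr
          intro x hx
          have := (PySem.List.mem_pyRange_one).mp hx
          simp only [decide_eq_true_eq]
          omega
        have h2 : ((PySem.List.pyRange (i + 1) (n + 1) 1).filter
            (fun i2 => decide (i < i2 ∨ (i = i2 ∧ i2 = n)))) = PySem.List.pyRange (i + 1) (n + 1) 1 := by
          apply List.filter_eq_self.mpr
          intro x hx
          have := (PySem.List.mem_pyRange_one).mp hx
          simp only [decide_eq_true_eq]
          omega
        rw [h1, h2, List.nil_append]
      rw [hfilter]
  rw [pv_flatMap_congr _ _ _ hbody]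
  rw [PySem.List.pyRange_one_succ_right hn, List.flatMap_append]
  have hleft : ∀ i ∈ PySem.List.pyRange 0 n 1,
      (if i = n then [((n : Int), (n : Int))]
       else (PySem.List.pyRange (i + 1) (n + 1) 1).map (fun i2 => (i, i2)))
      = (PySem.List.pyRange (i + 1) (n + 1) 1).map (fun i2 => (i, i2)) := by
    intro i hi
    have := (PySem.List.mem_pyRange_one).mp hi
    rw [if_neg (by omega)]
  rw [pv_flatMap_congr _ _ _ hleft]
  simp

-- the j loop over pyRange 0 m (all j < m), generic over remaining index list
theorem LJaux (m : Int) (hm : 0 ≤ m) (inact : List Int) :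
    ∀ (L : List Int), (∀ x ∈ L, 0 ≤ x ∧ x < m) →
    ∀ acc, L.foldl (gdBodyJ m) (inact, virList m m m, acc)
      = (inact, virList m m m,
         acc ++ L.flatMap (fun j => (PySem.List.pyRange (j + 1) (m + 1) 1).map (fun j2 => (inact, virList m j j2)))) := by
  intro L
  induction L with
  | nil => intro _ acc; simp
  | cons x L ih =>
    intro hmem acc
    have hx := hmem x (List.mem_cons_self)
    have ih' := ih (fun y hy => hmem y (List.mem_cons_of_mem _ hy))
    have hxm : x ≠ m := by omega
    simp only [List.foldl_cons]
    have hmin : min (x + 1) m = x + 1 := by omega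
    have hstep : gdBodyJ m (inact, virList m m m, acc) x
        = (inact, virList m m m,
           acc ++ (PySem.List.pyRange (x + 1) (m + 1) 1).map (fun j2 => (inact, virList m x j2))) := by
      simp only [gdBodyJ, ne_eq, hxm, not_false_eq_true, if_pos]
      rw [v1 m x hx.1 hx.2]
      rw [LJ2 m x hx.1 (by omega) inact acc]
      simp only [hmin]
      rw [v4 m x hx.1 hx.2]
    rw [hstep, ih']
    simp

theorem LJ (m : Int) (inact : List Int) (acc : List (List Int × List Int)) :
    gdLoopJ m (inact, virList m m m, acc)
      = (inact, virList m m m,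
         acc ++ (combPairs m).map (fun q => (inact, virList m q.1 q.2))) := by
  by_cases hm : 0 ≤ m
  case neg =>
    have h1 : PySem.List.pyRange 0 (m + 1) 1 = [] := PySem.List.pyRange_one_eq_nil (by omega)
    unfold gdLoopJ combPairs
    rw [h1]
    simp
  unfold gdLoopJ
  rw [PySem.List.pyRange_one_succ_right hm, List.foldl_append]
  rw [LJaux m hm inact _ (fun x hx => by
        have := (PySem.List.mem_pyRange_one).mp hx; omega) acc]
  simp only [List.foldl_cons, List.foldl_nil]
  have hstepm : ∀ acc2, gdBodyJ m (inact, virList m m m, acc2) m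
      = (inact, virList m m m, acc2 ++ [(inact, virList m m m)]) := by
    intro acc2
    simp only [gdBodyJ, ne_eq, not_true_eq_false, if_false]
    rw [LJ2 m m hm le_rfl inact acc2]
    have : min (m + 1) m = m := by omega
    rw [this, PySem.List.pyRange_one_cons (by omega), PySem.List.pyRange_one_eq_nil (by omega)]
    simp
  rw [hstepm]
  rw [combPairs_eq m hm, List.map_append, List.map_flatMap]
  simp [Function.comp_def, List.append_assoc]

-- the i2 loop, generic over remaining index list
theorem LI2aux (n m i : Int) (hi0 : 0 ≤ i) (hin : i ≤ n) :
    ∀ (L : List Int), (∀ x ∈ L, min (i + 1) n ≤ x ∧ x ≤ n) →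
    ∀ acc, L.foldl (gdBodyI2 n m) (occList n i n, virList m m m, acc)
      = (occList n i n, virList m m m,
         acc ++ L.flatMap (fun i2 => (combPairs m).map (fun q => (occList n i i2, virList m q.1 q.2)))) := by
  intro L
  induction L with
  | nil => intro _ acc; simp
  | cons x L ih =>
    intro hmem acc
    have hx := hmem x (List.mem_cons_self)
    have ih' := ih (fun y hy => hmem y (List.mem_cons_of_mem _ hy))
    simp only [List.foldl_cons]
    by_cases hxn : x = n
    · have hstep : gdBodyI2 n m (occList n i n, virList m m m, acc) x
          = (occList n i n, virList m m m,
             acc ++ (combPairs m).map (fun q => (occList n i n, virList m q.1 q.2))) := by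
        rw [hxn]
        simp only [gdBodyI2, ne_eq, not_true_eq_false, if_false]
        rw [LJ m (occList n i n) acc]
      rw [hstep, ih']
      simp [hxn]
    · have hx0 : 0 ≤ x := by omega
      have hxlt : x < n := by omega
      have hxi : x ≠ i := by omega
      have : gdBodyI2 n m (occList n i n, virList m m m, acc) x
          = (occList n i n, virList m m m,
             acc ++ (combPairs m).map (fun q => (occList n i x, virList m q.1 q.2))) := by
        simp only [gdBodyI2, ne_eq, hxn, not_false_eq_true, if_pos]
        rw [o2 n i x hx0 hxlt hxi]
        rw [LJ m (occList n i x) acc]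
        rw [o3 n i x hx0 hxlt hxi]
      rw [this, ih']
      simp

theorem LI2 (n m i : Int) (hi0 : 0 ≤ i) (hin : i ≤ n)
    (acc : List (List Int × List Int)) :
    gdLoopI2 n m i (occList n i n, virList m m m, acc)
      = (occList n i n, virList m m m,
         acc ++ (PySem.List.pyRange (min (i + 1) n) (n + 1) 1).flatMap
           (fun i2 => (combPairs m).map (fun q => (occList n i i2, virList m q.1 q.2)))) := by
  unfold gdLoopI2
  apply LI2aux n m i hi0 hin _ _ acc
  intro x hx
  have := (PySem.List.mem_pyRange_one).mp hx
  omega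

-- the outer i loop over pyRange 0 n, generic over remaining index list
theorem LIaux (n m : Int) :
    ∀ (L : List Int), (∀ x ∈ L, 0 ≤ x ∧ x < n) →
    ∀ acc, L.foldl (gdBodyI n m) (occList n n n, virList m m m, acc)
      = (occList n n n, virList m m m,
         acc ++ L.flatMap (fun i => (PySem.List.pyRange (i + 1) (n + 1) 1).flatMap
           (fun i2 => (combPairs m).map (fun q => (occList n i i2, virList m q.1 q.2))))) := by
  intro L
  induction L with
  | nil => intro _ acc; simp
  | cons x L ih =>
    intro hmem acc
    have hx := hmem x (List.mem_cons_self)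
    have ih' := ih (fun y hy => hmem y (List.mem_cons_of_mem _ hy))
    have hxn : x ≠ n := by omega
    simp only [List.foldl_cons]
    have hmin : min (x + 1) n = x + 1 := by omega
    have hstep : gdBodyI n m (occList n n n, virList m m m, acc) x
        = (occList n n n, virList m m m,
           acc ++ (PySem.List.pyRange (x + 1) (n + 1) 1).flatMap
             (fun i2 => (combPairs m).map (fun q => (occList n x i2, virList m q.1 q.2)))) := by
      simp only [gdBodyI, ne_eq, hxn, not_false_eq_true, if_pos]
      rw [o1 n x hx.1 hx.2]
      rw [LI2 n m x hx.1 (by omega) acc]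
      simp only [hmin]
      rw [o4 n x hx.1 hx.2]
    rw [hstep, ih']
    simp

-- ===== VERDICT (by name: the statement is the Claim_ definition above) =====
theorem generate_doubles_spec : Claim_equal_generate_doubles := by
  intro n m _
  unfold Spec_generate_doubles
  by_cases hn : 0 ≤ n
  case neg =>
    have h1 : PySem.List.pyRange 0 (n + 1) 1 = [] := PySem.List.pyRange_one_eq_nil (by omega)
    unfold generate_doubles generate_doubles_alt combPairs
    rw [h1]
    simp
  unfold generate_doubles generate_doubles_alt
  rw [repl_occ n, repl_vir m]
  rw [PySem.List.pyRange_one_succ_right hn, List.foldl_append]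
  rw [LIaux n m _ (fun x hx => by
        have := (PySem.List.mem_pyRange_one).mp hx; omega) []]
  simp only [List.foldl_cons, List.foldl_nil, List.nil_append]
  have hstepn : ∀ acc2, gdBodyI n m (occList n n n, virList m m m, acc2)  n
      = (occList n n n, virList m m m,
         acc2 ++ (combPairs m).map (fun q => (occList n n n, virList m q.1 q.2))) := by
    intro acc2
    simp only [gdBodyI, ne_eq, not_true_eq_false, if_false]
    rw [LI2 n m n hn le_rfl acc2]
    have hminn : min (n + 1) n = n := by omega
    rw [hminn, PySem.List.pyRange_one_cons (by omega), PySem.List.pyRange_one_eq_nil (by omega)]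
    simp
  rw [hstepn]
  rw [combPairs_eq n hn, List.flatMap_append, List.flatMap_assoc]
  simp [List.flatMap_map, List.append_assoc]
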